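-- pv_equiv track=rewrite | github.com/kruemmel-python/NOVA-SYNESIS | src/nova_synesis/runtime/handlers.py | _detect_csv_columns
-- ===== SOURCE A (Python) =====
-- from typing import Any, Awaitable, Callable
--
-- def _detect_csv_columns(rows: list[dict[str, Any]]) -> list[str]:
--     seen: list[str] = []
--     for row in rows:
--         for key in row.keys():
--             key_text = str(key).strip()
--             if key_text and key_text not in seen:
--                 seen.append(key_text)
--     return seen
-- ===== SOURCE B (Python) =====
-- def _detect_csv_columns(rows):
--     # Stage 1: flatten all keys to a stripped, non-empty stream.
--     keys = [k for row in rows for k in (str(key).strip() for key in row.keys()) if k]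
--     # Stage 2: sieve out duplicates: take the head, purge every later copy
--     # of it from the remaining stream, repeat. No 'seen' membership test.
--     out = []
--     while keys:
--         head = keys[0]
--         out.append(head)
--         keys = [y for y in keys[1:] if y != head]
--     return out
-- ===== Notes on version B (the rewrite author's own statement) =====
-- stated objective: alternative
-- what changed: Replaces A's single pass with a seen-list membership test by a two-stage approach: flatten/strip/filter all keys first, then dedup with a sieve that repeatedly takes the head and purges all its later copies from the remaining stream (no seen structure, no membership test).
import Mathlib
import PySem

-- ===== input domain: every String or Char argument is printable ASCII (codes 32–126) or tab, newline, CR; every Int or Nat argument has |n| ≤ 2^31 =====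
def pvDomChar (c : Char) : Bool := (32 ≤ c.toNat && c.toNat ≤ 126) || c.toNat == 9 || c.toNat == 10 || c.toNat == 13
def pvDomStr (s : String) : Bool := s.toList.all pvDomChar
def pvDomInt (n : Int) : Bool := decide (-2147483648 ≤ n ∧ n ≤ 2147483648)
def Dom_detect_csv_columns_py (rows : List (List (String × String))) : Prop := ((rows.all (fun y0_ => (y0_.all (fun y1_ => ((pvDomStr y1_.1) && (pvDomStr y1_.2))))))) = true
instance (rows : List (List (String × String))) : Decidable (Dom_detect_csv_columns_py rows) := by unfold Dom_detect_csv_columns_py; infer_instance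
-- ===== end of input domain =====

-- B stages the work differently: it first flattens all stripped non-empty keys into one
-- stream, then dedups with a head-and-purge sieve instead of A's seen-list membership loop.

-- ===== PORT A =====
-- seen-list accumulator: for each row, for each key, strip; append if non-empty and unseen
def detect_csv_columns_py (rows : List (List (String × String))) : List String :=
  rows.foldl (fun seen row =>
    row.foldl (fun seen kv =>
      let key_text := PySem.Str.strip kv.1
      if key_text ≠ "" ∧ ¬ seen.contains key_text then seen ++ [key_text] else seen)
      seen) []

-- ===== PORT B =====
-- the while loop: take the head, append it to out, purge its copies from the rest
def pvSieve (keys out : List String) : List String :=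
  match keys with
  | [] => out
  | head :: tail => pvSieve (tail.filter (fun y => !(y == head))) (out ++ [head])
termination_by keys.length
decreasing_by
  simp only [List.length_unattach]
  exact Nat.lt_succ_of_le (Nat.le_trans (List.length_filter_le _ _) (by simp))

def detect_csv_columns_py_alt (rows : List (List (String × String))) : List String :=
  pvSieve
    ((rows.flatMap (fun row => row.map (fun kv => PySem.Str.strip kv.1))).filter
      (fun k => !(k == "")))
    []

-- ===== PRECONDITION & SPEC =====
def Spec_detect_csv_columns_py (rows : List (List (String × String))) (out : List String) : Prop := out = detect_csv_columns_py_alt rows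
instance (rows : List (List (String × String))) (out : List String) : Decidable (Spec_detect_csv_columns_py rows out) := by unfold Spec_detect_csv_columns_py; infer_instance

-- ===== CLAIM (what is proved, stated in full; the proofs are below) =====
def Claim_equal_detect_csv_columns_py : Prop := ∀ (rows : List (List (String × String))), Dom_detect_csv_columns_py rows → Spec_detect_csv_columns_py rows (detect_csv_columns_py rows)

-- ===== LEMMAS AND PROOFS =====

-- A's inner loop over one row, from an arbitrary seen, equals folding Set.add over
-- the stripped non-empty keys of that row.
theorem inner_eq (row : List (String × String)) (seen : List String) :
    row.foldl (fun seen kv =>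
      let key_text := PySem.Str.strip kv.1
      if key_text ≠ "" ∧ ¬ seen.contains key_text then seen ++ [key_text] else seen)
      seen
    = ((row.map (fun kv => PySem.Str.strip kv.1)).filter (fun k => !(k == ""))).foldl
        PySem.Set.add seen := by
  induction row generalizing seen with
  | nil => rfl
  | cons kv rest ih =>
    simp only [List.foldl_cons, List.map_cons, List.filter_cons]
    by_cases he : PySem.Str.strip kv.1 = ""
    · rw [if_neg (by simp [he]), if_neg (by simp [he])]
      exact ih seen
    · by_cases hc : (seen.contains (PySem.Str.strip kv.1)) = true
      · rw [if_neg (fun h => h.2 hc), if_pos (show (!(PySem.Str.strip kv.1 == "")) = true by simp [he]),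
          List.foldl_cons,
          show PySem.Set.add seen (PySem.Str.strip kv.1) = seen from by
            simp only [PySem.Set.add]; simp only [List.contains_iff_mem] at hc; simp [hc]]
        exact ih seen
      · rw [if_pos ⟨he, fun h => hc h⟩, if_pos (show (!(PySem.Str.strip kv.1 == "")) = true by simp [he]),
          List.foldl_cons,
          show PySem.Set.add seen (PySem.Str.strip kv.1) = seen ++ [PySem.Str.strip kv.1] from by
            simp only [PySem.Set.add]; simp only [List.contains_iff_mem] at hc; simp [hc]]
        exact ih _

-- A's outer loop from an arbitrary seen equals folding Set.add over the whole
-- filtered stream.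
theorem outer_eq (rows : List (List (String × String))) (seen : List String) :
    rows.foldl (fun seen row =>
      row.foldl (fun seen kv =>
        let key_text := PySem.Str.strip kv.1
        if key_text ≠ "" ∧ ¬ seen.contains key_text then seen ++ [key_text] else seen)
        seen) seen
    = (((rows.flatMap (fun row => row.map (fun kv => PySem.Str.strip kv.1))).filter
        (fun k => !(k == "")))).foldl PySem.Set.add seen := by
  induction rows generalizing seen with
  | nil => rfl
  | cons row rest ih =>
    simp only [List.foldl_cons, List.flatMap_cons, List.filter_append, List.foldl_append]
    rw [inner_eq, ih]

-- The ordered-dedup fold equals the sieve: from any accumulator acc, folding Set.add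
-- over xs equals sieving the elements of xs not already in acc, appended after acc.
theorem foldl_add_eq_sieve (xs : List String) (acc : List String) :
    xs.foldl PySem.Set.add acc = pvSieve (xs.filter (fun y => !(acc.contains y))) acc := by
  induction xs generalizing acc with
  | nil => simp [pvSieve]
  | cons h t ih =>
    simp only [List.foldl_cons, List.filter_cons]
    by_cases hc : (acc.contains h) = true
    · have hm : h ∈ acc := by simpa using hc
      rw [if_neg (by simp [hm]),
        show PySem.Set.add acc h = acc from by simp only [PySem.Set.add]; simp [hm]]
      exact ih acc
    · have hm : h ∉ acc := by simpa using hc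
      rw [if_pos (by simp [hm]),
        show PySem.Set.add acc h = acc ++ [h] from by simp only [PySem.Set.add]; simp [hm]]
      rw [ih (acc ++ [h])]
      rw [pvSieve, List.filter_filter]
      congr 1
      apply List.filter_congr
      intro y _
      simp [Bool.and_comm]
      by_cases hy : y = h <;> simp [hy]

-- ===== VERDICT (by name: the statement is the Claim_ definition above) =====
theorem detect_csv_columns_py_spec : Claim_equal_detect_csv_columns_py := by
  intro rows _
  show detect_csv_columns_py rows = detect_csv_columns_py_alt rows
  unfold detect_csv_columns_py detect_csv_columns_py_alt
  rw [outer_eq, foldl_add_eq_sieve]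
  simp
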